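-- pv_equiv track=rewrite | github.com/pypi-data/pypi-mirror-324 | packages/fallible/fallible-2025.1.30-py3-none-any.whl/fallible/_vendor/ansible/lib/ansible/_internal/_templating/_engine.py | _count_newlines_from_end
-- ===== SOURCE A (Python) =====
-- def _count_newlines_from_end(in_str):
--     """
--     Counts the number of newlines at the end of a string. This is used during
--     the jinja2 templating to ensure the count matches the input, since some newlines
--     may be thrown away during the templating.
--     """
--
--     i = len(in_str)
--     j = i - 1
--
--     try:
--         while in_str[j] == '\n':
--             j -= 1
--     except IndexError:
--         # Uncommon cases: zero length string and string containing only newlines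
--         return i
--
--     return i - 1 - j
-- ===== SOURCE B (Python) =====
-- def _count_newlines_from_end(in_str):
--     """
--     Counts the number of newlines at the end of a string. This is used during
--     the jinja2 templating to ensure the count matches the input, since some newlines
--     may be thrown away during the templating.
--     """
--     run = 0
--     for ch in in_str:
--         run = run + 1 if ch == '\n' else 0
--     return run
-- ===== Notes on version B (the rewrite author's own statement) =====
-- stated objective: alternative
-- what changed: Replaces A's backward index scan with try/except IndexError by a forward single pass that maintains a running count of the current newline run (reset to 0 on any other character); the value left after the whole string is the trailing-newline count.
import Mathlib
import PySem

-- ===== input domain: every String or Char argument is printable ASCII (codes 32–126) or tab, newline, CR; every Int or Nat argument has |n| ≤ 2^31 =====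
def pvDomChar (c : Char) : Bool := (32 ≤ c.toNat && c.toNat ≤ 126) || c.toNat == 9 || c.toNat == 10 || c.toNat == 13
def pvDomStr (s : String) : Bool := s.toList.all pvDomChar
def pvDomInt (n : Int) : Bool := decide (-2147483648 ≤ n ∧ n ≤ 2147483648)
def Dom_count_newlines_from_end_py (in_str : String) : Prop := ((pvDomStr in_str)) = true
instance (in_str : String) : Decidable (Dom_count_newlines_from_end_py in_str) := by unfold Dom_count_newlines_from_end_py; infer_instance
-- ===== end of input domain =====

-- B replaces A's backward index scan with try/except by a forward single pass keeping a
-- running counter of the current newline run (alternative decomposition; not faster).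

-- ===== PORT A =====
-- A's while loop over the decreasing index j; the `none` (IndexError) branch returns i.
-- The fuel 2*len+2 is a totality guard only: on an all-newline string Python's negative
-- indices wrap around once more through the string before IndexError, so the scan makes
-- at most 2*len+1 reads; the fuel is never exhausted.
def pvLoopA (s : List Char) (i : Int) (j : Int) (fuel : Nat) : Int :=
  match fuel with
  | 0 => i
  | fuel + 1 =>
    match PySem.List.pyGet? s j with
    | none => i                       -- except IndexError: return i
    | some c => if c = '\n' then pvLoopA s i (j - 1) fuel else i - 1 - j

def count_newlines_from_end_py (in_str : String) : Int :=
  let s := in_str.toList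
  let i : Int := s.length
  pvLoopA s i (i - 1) (2 * s.length + 2)

-- ===== PORT B =====
-- forward pass: run = run + 1 on '\n', reset to 0 otherwise; return the final run.
def count_newlines_from_end_py_alt (in_str : String) : Int :=
  in_str.toList.foldl (fun run c => if c = '\n' then run + 1 else 0) 0

-- ===== PRECONDITION & SPEC =====
def Spec_count_newlines_from_end_py (in_str : String) (out : Int) : Prop := out = count_newlines_from_end_py_alt in_str
instance (in_str : String) (out : Int) : Decidable (Spec_count_newlines_from_end_py in_str out) := by unfold Spec_count_newlines_from_end_py; infer_instance

-- ===== CLAIM (what is proved, stated in full; the proofs are below) =====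
def Claim_equal_count_newlines_from_end_py : Prop := ∀ (in_str : String), Dom_count_newlines_from_end_py in_str → Spec_count_newlines_from_end_py in_str (count_newlines_from_end_py in_str)

-- ===== LEMMAS AND PROOFS =====

-- Reading an in-range nonnegative index gives the element.
theorem pvPyGet?_nonneg {s : List Char} {j : Int} (h0 : 0 ≤ j) (h1 : j.toNat < s.length) :
    PySem.List.pyGet? s j = some s[j.toNat] := by
  have h1' : j < (s.length : Int) := by omega
  simp [PySem.List.pyGet?, PySem.List.pyIdx?, h0, h1']

-- All-newline string: the loop walks j down past -n and returns i.
theorem pvLoopA_all_nl (s : List Char) (i : Int)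
    (hall : ∀ m : Nat, (hm : m < s.length) → s[m] = '\n') :
    ∀ (fuel : Nat) (j : Int), j ≤ (s.length : Int) - 1 → pvLoopA s i j fuel = i := by
  intro fuel
  induction fuel with
  | zero => intro j _; rfl
  | succ f ih =>
    intro j hj
    show (match PySem.List.pyGet? s j with
      | none => i
      | some c => if c = '\n' then pvLoopA s i (j - 1) f else i - 1 - j) = i
    by_cases hlt : j < -(s.length : Int)
    · have hnone : PySem.List.pyGet? s j = none := by
        simp [PySem.List.pyGet?, PySem.List.pyIdx?]
        intro k hk
        split_ifs at hk <;> omega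
      simp [hnone]
    · by_cases h0 : 0 ≤ j
      · rw [pvPyGet?_nonneg h0 (by omega)]
        rw [hall j.toNat (by omega)]
        simp [ih (j - 1) (by omega)]
      · -- negative in-range index: wraps to s.length - (-j).toNat
        have hm : s.length - (-j).toNat < s.length := by omega
        have hge : -(s.length : Int) ≤ j := by omega
        have hidx : PySem.List.pyGet? s j = some s[s.length - (-j).toNat] := by
          simp [PySem.List.pyGet?, PySem.List.pyIdx?, h0, hge, List.getElem?_eq_getElem hm]
        rw [hidx, hall _ hm]
        simp [ih (j - 1) (by omega)]

-- A non-newline at position p, newlines above: the loop stops at p with i - 1 - p.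
theorem pvLoopA_stop (s : List Char) (i : Int) (p : Nat) (hp : p < s.length)
    (hne : s[p] ≠ '\n')
    (hnl : ∀ m : Nat, (hm : m < s.length) → p < m → s[m] = '\n') :
    ∀ (fuel : Nat) (j : Int), (p : Int) ≤ j → j ≤ (s.length : Int) - 1 →
      fuel ≥ (j - p).toNat + 1 → pvLoopA s i j fuel = i - 1 - p := by
  intro fuel
  induction fuel with
  | zero => intro j _ _ hf; omega
  | succ f ih =>
    intro j hjl hju _
    show (match PySem.List.pyGet? s j with
      | none => i
      | some c => if c = '\n' then pvLoopA s i (j - 1) f else i - 1 - j) = i - 1 - p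
    rw [pvPyGet?_nonneg (by omega) (by omega)]
    rcases eq_or_lt_of_le hjl with heq | hlt
    · subst heq
      simp [Int.toNat_natCast, hne]
    · rw [hnl j.toNat (by omega) (by omega)]
      simp
      exact ih (j - 1) (by omega) (by omega) (by omega)

-- takeWhile positions satisfy the predicate.
theorem pvTakeWhile_getElem {l : List Char} {P : Char → Bool} {t : Nat}
    (ht : t < (l.takeWhile P).length) (hl : t < l.length) :
    P l[t] = true := by
  have hpre := List.takeWhile_prefix (l := l) (p := P)
  have hget := hpre.getElem ht
  have hmem := List.mem_takeWhile_imp (l := l) (p := P)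
    (List.getElem_mem (l := l.takeWhile P) (h := ht))
  rw [hget] at hmem
  exact hmem

-- the first position after takeWhile fails the predicate.
theorem pvDropWhile_head {l : List Char} {P : Char → Bool}
    (h : (l.takeWhile P).length < l.length) :
    P (l[(l.takeWhile P).length]'h) = false := by
  have hsplit : l.takeWhile P ++ l.dropWhile P = l := l.takeWhile_append_dropWhile
  have hne : l.dropWhile P ≠ [] := by
    intro hnil
    have hlen := congrArg List.length hsplit
    simp [hnil] at hlen
    omega
  have hpos : 0 < (l.dropWhile P).length := List.length_pos_iff.mpr hne
  have hlt : (l.takeWhile P).length < (l.takeWhile P ++ l.dropWhile P).length := by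
    simp; omega
  have e0 : l[(l.takeWhile P).length]'h
      = (l.takeWhile P ++ l.dropWhile P)[(l.takeWhile P).length]'hlt :=
    List.getElem_of_eq hsplit.symm h
  rw [e0, List.getElem_append_right (le_refl _)]
  simp only [Nat.sub_self]
  rw [← List.head_eq_getElem hne]
  exact List.head_dropWhile_not P hne

-- B's forward fold computes the length of the trailing newline run.
theorem pvFoldB_eq (s : List Char) :
    s.foldl (fun run c => if c = '\n' then run + 1 else 0) (0 : Int)
      = ((s.reverse.takeWhile (· == '\n')).length : Int) := by
  induction s using List.reverseRecOn with
  | nil => simp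
  | append_singleton t c ih =>
    rw [List.foldl_append]
    simp only [List.foldl_cons, List.foldl_nil, List.reverse_append, List.reverse_cons,
      List.reverse_nil, List.nil_append, List.cons_append, List.takeWhile]
    by_cases hc : c = '\n'
    · simp [hc, ih]
    · have hb : (c == '\n') = false := by simp [hc]
      simp [hb, hc]

-- ===== VERDICT (by name: the statement is the Claim_ definition above) =====
theorem count_newlines_from_end_py_spec : Claim_equal_count_newlines_from_end_py := by
  intro in_str _
  unfold Spec_count_newlines_from_end_py count_newlines_from_end_py count_newlines_from_end_py_alt
  simp only
  rw [pvFoldB_eq]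
  generalize in_str.toList = s
  -- positions counted by takeWhile are newlines (in s-coordinates: the top indices)
  have hrev : ∀ m : Nat, (hm : m < s.length) →
      s.length - 1 - m < (s.reverse.takeWhile (· == '\n')).length → s[m] = '\n' := by
    intro m hm hmk
    have hl : s.length - 1 - m < s.reverse.length := by simp; omega
    have h1 := pvTakeWhile_getElem (l := s.reverse) (P := (· == '\n')) (t := s.length - 1 - m)
      hmk hl
    rw [List.getElem_reverse] at h1
    have hidx : s.length - 1 - (s.length - 1 - m) = m := by omega
    simp only [hidx] at h1
    simpa using h1
  have hkle : (s.reverse.takeWhile (· == '\n')).length ≤ s.length := by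
    have := List.takeWhile_sublist (p := (· == '\n')) (l := s.reverse)
    have := this.length_le
    simpa using this
  by_cases hkn : (s.reverse.takeWhile (· == '\n')).length = s.length
  · -- all-newline string: A returns i = len; B computed len
    have hall : ∀ m : Nat, (hm : m < s.length) → s[m] = '\n' := by
      intro m hm; exact hrev m hm (by omega)
    rw [pvLoopA_all_nl s s.length hall _ _ (by omega)]
    omega
  · -- the scan stops at p = len - 1 - k, the first non-newline from the end
    have hkn' : (s.reverse.takeWhile (· == '\n')).length < s.length := by omega
    have hplen : (s.reverse.takeWhile (· == '\n')).length < s.reverse.length := by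
      simp; omega
    have hpfail := pvDropWhile_head (l := s.reverse) (P := (· == '\n')) hplen
    rw [List.getElem_reverse] at hpfail
    simp only [beq_eq_false_iff_ne, ne_eq] at hpfail
    have hstop := pvLoopA_stop s s.length (s.length - 1 - (s.reverse.takeWhile (· == '\n')).length)
      (by omega) hpfail
      (fun m hm hpm => hrev m hm (by omega))
      (2 * s.length + 2) ((s.length : Int) - 1) (by omega) (by omega) (by omega)
    rw [hstop]
    omega
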